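-- pv_equiv track=rewrite | github.com/edoardob90/aoc2022 | 10/10.py | part1
-- ===== SOURCE A (Python) =====
-- def run(instruction, register, cycle):
--     """Run a given istruction, return the cycles spent in the execution"""
--     if instruction == "noop":
--         cycle += 1
--     elif instruction.startswith("addx"):
--         _, arg = instruction.strip().split()
--         register += int(arg)
--         cycle += 2
--     return cycle, register
--
-- def part1(data):
--     """Solve part 1"""
--     reg = 1
--     cycle = strength = pixel_pos = 0
--     pixels = []
--     check = 20
--     for instruction in data:
--         last_reg = reg
--         cycle, reg = run(instruction, reg, cycle)
--
--         if cycle >= check: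
--             strength += check * last_reg
--             check += 40
--
--         while pixel_pos < cycle:
--             pixels.append(
--                 "#"
--                 if (pixel_pos % 40) >= last_reg - 1 and (pixel_pos % 40) <= last_reg + 1
--                 else "."
--             )
--             pixel_pos += 1
--
--     return strength, pixels
-- ===== SOURCE B (Python) =====
-- def part1(data):
--     """Solve part 1: build a per-cycle register timeline, then two separate passes."""
--     reg = 1
--     timeline = []
--     for instruction in data:
--         if instruction == "noop":
--             timeline.append(reg)
--         elif instruction.startswith("addx"):
--             _, arg = instruction.strip().split()
--             timeline.extend((reg, reg))
--             reg += int(arg)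
--     strength = sum(c * timeline[c - 1] for c in range(20, len(timeline) + 1, 40))
--     pixels = ["#" if abs(i % 40 - timeline[i]) <= 1 else "." for i in range(len(timeline))]
--     return strength, pixels
-- ===== Notes on version B (the rewrite author's own statement) =====
-- stated objective: alternative
-- what changed: B replaces A's single fused loop with interleaved checkpoint/check bookkeeping and an inner pixel while-loop by one pass that builds a per-cycle register timeline, then computes the signal strength and the pixel row in two separate batch passes over that timeline.
import Mathlib
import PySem

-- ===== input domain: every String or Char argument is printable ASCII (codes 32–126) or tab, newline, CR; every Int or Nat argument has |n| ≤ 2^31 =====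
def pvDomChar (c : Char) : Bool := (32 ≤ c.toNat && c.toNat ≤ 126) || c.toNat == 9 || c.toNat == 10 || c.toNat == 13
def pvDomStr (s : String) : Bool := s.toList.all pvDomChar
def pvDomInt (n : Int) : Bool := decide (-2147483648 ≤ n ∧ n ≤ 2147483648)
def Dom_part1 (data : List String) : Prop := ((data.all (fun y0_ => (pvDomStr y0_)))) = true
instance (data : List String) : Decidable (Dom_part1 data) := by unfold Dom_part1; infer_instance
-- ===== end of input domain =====

-- B rebuilds A's answer from a per-cycle register timeline: one pass builds the timeline,
-- two separate passes compute the strength and the pixels (objective: alternative decomposition).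
-- A raises (ValueError) on lines starting with "addx" whose payload does not unpack into two
-- whitespace-separated tokens with an int-parsable second token; Pre_part1 excludes exactly those.

-- ===== PORT A =====
-- `run` helper; the `none`/wildcard branches are where Python raises ValueError (excluded by Pre_part1)
def runA (instruction : String) (register cycle : Int) : Int × Int :=
  if instruction = "noop" then (cycle + 1, register)
  else if PySem.Str.startswith instruction "addx" then
    match PySem.Str.split₀ (PySem.Str.strip instruction) with
    | [_, arg] =>
      match PySem.Int.ofStr? arg with
      | some v => (cycle + 2, register + v)
      | none => (cycle, register)
    | _ => (cycle, register)
  else (cycle, register)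

-- the inner `while pixel_pos < cycle` loop of A
def pixelLoop (lastReg cycle pixelPos : Int) (pixels : List String) : Int × List String :=
  if _h : pixelPos < cycle then
    pixelLoop lastReg cycle (pixelPos + 1)
      (pixels ++ [if PySem.Int.mod pixelPos 40 ≥ lastReg - 1 ∧ PySem.Int.mod pixelPos 40 ≤ lastReg + 1
                  then "#" else "."])
  else (pixelPos, pixels)
termination_by (cycle - pixelPos).toNat
decreasing_by omega

-- state: (reg, cycle, strength, pixel_pos, pixels, check)
def stepA (st : Int × Int × Int × Int × List String × Int) (instruction : String) :
    Int × Int × Int × Int × List String × Int :=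
  match st with
  | (reg, cycle, strength, pixel_pos, pixels, check) =>
    let lastReg := reg
    let cr := runA instruction reg cycle
    let cycle' := cr.1
    let reg' := cr.2
    let strength' := if cycle' ≥ check then strength + check * lastReg else strength
    let check' := if cycle' ≥ check then check + 40 else check
    let pp := pixelLoop lastReg cycle' pixel_pos pixels
    (reg', cycle', strength', pp.1, pp.2, check')

def part1 (data : List String) : Int × List String :=
  let st := data.foldl stepA (1, 0, 0, 0, ([] : List String), 20)
  (st.2.2.1, st.2.2.2.2.1)

-- ===== PORT B =====
-- one pass: (register, per-cycle register timeline)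
def stepB (st : Int × List Int) (instruction : String) : Int × List Int :=
  match st with
  | (reg, timeline) =>
    if instruction = "noop" then (reg, timeline ++ [reg])
    else if PySem.Str.startswith instruction "addx" then
      match PySem.Str.split₀ (PySem.Str.strip instruction) with
      | [_, arg] =>
        match PySem.Int.ofStr? arg with
        | some v => (reg + v, timeline ++ [reg, reg])
        | none => (reg, timeline)
      | _ => (reg, timeline)
    else (reg, timeline)

-- second pass: checkpoint sum over the timeline
def strengthPass (timeline : List Int) : Int :=
  ((PySem.List.pyRange 20 ((timeline.length : Int) + 1) 40).map
    (fun c => c * PySem.List.pyGetD timeline (c - 1) 0)).sum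

-- third pass: pixels from the timeline
def pixelPass (timeline : List Int) : List String :=
  (List.range timeline.length).map
    (fun (i : Nat) => if (PySem.Int.mod (i : Int) 40 - PySem.List.pyGetD timeline (i : Int) 0).natAbs ≤ 1
              then "#" else ".")

def part1_alt (data : List String) : Int × List String :=
  let rt := data.foldl stepB (1, [])
  (strengthPass rt.2, pixelPass rt.2)

-- ===== PRECONDITION & SPEC =====
-- Pre_part1 excludes exactly the inputs on which A raises ValueError: a line starting with
-- "addx" that does not split into two tokens with an int-parsable second token.
def PreLine (s : String) : Bool :=
  !(PySem.Str.startswith s "addx") ||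
    (match PySem.Str.split₀ (PySem.Str.strip s) with
     | [_, arg] => (PySem.Int.ofStr? arg).isSome
     | _ => false)

def Pre_part1 (data : List String) : Prop := data.all PreLine = true
instance (data : List String) : Decidable (Pre_part1 data) := by unfold Pre_part1; infer_instance

def pvWitness_part1 : List String := ["noop", "addx 3", "noop", "addx -5"]

def Spec_part1 (data : List String) (out : Int × List String) : Prop := out = part1_alt data
instance (data : List String) (out : Int × List String) : Decidable (Spec_part1 data out) := by unfold Spec_part1; infer_instance

-- ===== CLAIM (what is proved, stated in full; the proofs are below) =====
def Claim_equal_part1 : Prop := ∀ (data : List String), Dom_part1 data → Pre_part1 data → Spec_part1 data (part1 data)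

-- ===== LEMMAS AND PROOFS =====

-- number of checkpoints 20, 60, … that fit in n cycles
def Kc (n : Nat) : Nat := (n + 20) / 40

-- the `check` variable of A as a function of the elapsed cycle count
def checkOf (n : Nat) : Int := 20 + 40 * ((Kc n : Nat) : Int)

-- A's current state written as a function of B's timeline
def mkA (reg : Int) (tl : List Int) : Int × Int × Int × Int × List String × Int :=
  (reg, (tl.length : Int), strengthPass tl, (tl.length : Int), pixelPass tl, checkOf tl.length)

lemma checkOf_gt (n : Nat) : (n : Int) < checkOf n := by
  unfold checkOf Kc; omega

lemma checkOf_step (n m : Nat) (hm : m ≤ 2) :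
    checkOf (n + m) = if ((n + m : Nat) : Int) ≥ checkOf n then checkOf n + 40 else checkOf n := by
  unfold checkOf Kc; split_ifs with h <;> omega

lemma strengthPass_eq (tl : List Int) :
    strengthPass tl =
      ((List.range (Kc tl.length)).map
        (fun k => ((20 + 40 * k : Nat) : Int) * tl.getD (40 * k + 19) 0)).sum := by
  unfold strengthPass
  rw [PySem.List.pyRange_of_pos _ _ (by norm_num)]
  have hcnt : (if (20:Int) < (tl.length : Int) + 1 then (((tl.length : Int) + 1 - 20 + 40 - 1)/40).toNat else 0) = Kc tl.length := by
    unfold Kc; split_ifs <;> omega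
  rw [hcnt, List.map_map]
  congr 1
  apply List.map_congr_left
  intro k _
  have h1 : (20 + 40 * (k:Int) - 1) = ((40 * k + 19 : Nat) : Int) := by push_cast; ring
  simp only [Function.comp_def, h1, PySem.List.pyGetD_natCast]
  push_cast; ring

lemma pixelPass_getD (xs : List Int) :
    pixelPass xs = (List.range xs.length).map
      (fun (i : Nat) => if (PySem.Int.mod (i : Int) 40 - xs.getD i 0).natAbs ≤ 1 then "#" else ".") := by
  unfold pixelPass
  apply List.map_congr_left
  intro i _
  rw [PySem.List.pyGetD_natCast]

lemma pixelPass_step (tl : List Int) (reg : Int) (m : Nat) :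
    pixelPass (tl ++ List.replicate m reg) =
      pixelPass tl ++ (List.range m).map (fun j =>
        if (PySem.Int.mod ((tl.length + j : Nat) : Int) 40 - reg).natAbs ≤ 1 then "#" else ".") := by
  rw [pixelPass_getD, pixelPass_getD]
  rw [List.length_append, List.length_replicate, List.range_add, List.map_append, List.map_map]
  congr 1
  · apply List.map_congr_left
    intro i hi
    rw [List.mem_range] at hi
    rw [List.getD_append _ _ _ _ hi]
  · apply List.map_congr_left
    intro j hj
    rw [List.mem_range] at hj
    have hg : (tl ++ List.replicate m reg).getD (tl.length + j) 0 = reg := by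
      rw [List.getD_eq_getElem?_getD, List.getElem?_append_right (by omega)]
      simp [hj]
    simp only [Function.comp_def, hg]

lemma strengthPass_step (tl : List Int) (reg : Int) (m : Nat) (hm1 : 1 ≤ m) (hm2 : m ≤ 2) :
    strengthPass (tl ++ List.replicate m reg) =
      (if ((tl.length + m : Nat) : Int) ≥ checkOf tl.length
       then strengthPass tl + checkOf tl.length * reg else strengthPass tl) := by
  rw [strengthPass_eq, strengthPass_eq tl]
  have hlen : (tl ++ List.replicate m reg).length = tl.length + m := by simp
  rw [hlen]
  have hold : ∀ k < Kc tl.length,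
      (tl ++ List.replicate m reg).getD (40 * k + 19) 0 = tl.getD (40 * k + 19) 0 := by
    intro k hk
    have : 40 * k + 19 < tl.length := by unfold Kc at hk; omega
    rw [List.getD_append _ _ _ _ this]
  split_ifs with h
  · have hK : Kc (tl.length + m) = Kc tl.length + 1 := by
      unfold checkOf Kc at *; omega
    rw [hK, List.range_succ, List.map_append, List.sum_append]
    congr 1
    · congr 1
      apply List.map_congr_left
      intro k hk
      rw [List.mem_range] at hk
      rw [hold k hk]
    · have hlo : tl.length ≤ 40 * Kc tl.length + 19 := by unfold checkOf Kc at *; omega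
      have hhi : 40 * Kc tl.length + 19 < tl.length + m := by unfold checkOf Kc at *; omega
      have hg : (tl ++ List.replicate m reg).getD (40 * Kc tl.length + 19) 0 = reg := by
        rw [List.getD_eq_getElem?_getD, List.getElem?_append_right (by omega)]
        have : 40 * Kc tl.length + 19 - tl.length < m := by omega
        simp [this]
      simp only [List.map_cons, List.map_nil, List.sum_cons, List.sum_nil, hg]
      unfold checkOf; push_cast; ring
  · have hK : Kc (tl.length + m) = Kc tl.length := by
      unfold checkOf Kc at *; omega
    rw [hK]
    congr 1
    apply List.map_congr_left
    intro k hk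
    rw [List.mem_range] at hk
    rw [hold k hk]

lemma pix_eq (p reg : Int) :
    (if PySem.Int.mod p 40 ≥ reg - 1 ∧ PySem.Int.mod p 40 ≤ reg + 1 then "#" else (".":String)) =
    (if (PySem.Int.mod p 40 - reg).natAbs ≤ 1 then "#" else (".":String)) := by
  rw [PySem.Int.mod_eq_emod_of_pos (by norm_num)]
  exact if_congr (by omega) rfl rfl

lemma pixelLoop_run (reg : Int) (n m : Nat) (px : List String) :
    pixelLoop reg ((n + m : Nat) : Int) ((n : Nat) : Int) px =
      (((n + m : Nat) : Int),
       px ++ (List.range m).map (fun j =>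
        if (PySem.Int.mod ((n + j : Nat) : Int) 40 - reg).natAbs ≤ 1 then "#" else ".")) := by
  induction m generalizing n px with
  | zero => rw [pixelLoop]; simp
  | succ m ih =>
    rw [pixelLoop, dif_pos (by push_cast; omega)]
    have h1 : ((n : Int) + 1) = ((n + 1 : Nat) : Int) := by push_cast; ring
    have h2 : ((n + (m + 1) : Nat) : Int) = (((n + 1) + m : Nat) : Int) := by push_cast; ring
    rw [h1, h2, ih (n + 1) _]
    rw [pix_eq]
    simp [List.range_succ_eq_map, List.map_map, Function.comp_def, Nat.add_left_comm, Nat.add_comm]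

lemma step_common (reg v : Int) (tl : List Int) (m : Nat) (hm1 : 1 ≤ m) (hm2 : m ≤ 2) :
    ((v, ((tl.length : Int) + (m : Int)),
      (if ((tl.length : Int) + (m : Int)) ≥ checkOf tl.length
       then strengthPass tl + checkOf tl.length * reg else strengthPass tl),
      (pixelLoop reg ((tl.length : Int) + (m : Int)) (tl.length : Int) (pixelPass tl)).1,
      (pixelLoop reg ((tl.length : Int) + (m : Int)) (tl.length : Int) (pixelPass tl)).2,
      (if ((tl.length : Int) + (m : Int)) ≥ checkOf tl.length
       then checkOf tl.length + 40 else checkOf tl.length))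
      : Int × Int × Int × Int × List String × Int)
    = mkA v (tl ++ List.replicate m reg) := by
  have hcast : ((tl.length : Int) + (m : Int)) = ((tl.length + m : Nat) : Int) := by push_cast; ring
  unfold mkA
  simp only [List.length_append, List.length_replicate]
  rw [hcast, pixelLoop_run, strengthPass_step tl reg m hm1 hm2, pixelPass_step,
    checkOf_step tl.length m hm2]

lemma stepA_mkA (s : String) (hs : PreLine s = true) (reg : Int) (tl : List Int) :
    stepA (mkA reg tl) s = mkA (stepB (reg, tl) s).1 (stepB (reg, tl) s).2 := by
  by_cases hne : s = "noop"
  · subst hne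
    simp only [stepA, stepB, runA, mkA]
    have h1 : ((1 : Nat) : Int) = 1 := by norm_num
    have := step_common reg reg tl 1 le_rfl (by norm_num)
    rw [h1] at this
    simpa [mkA, List.replicate] using this
  · by_cases hsw : PySem.Str.startswith s "addx" = true
    · have hps : (match PySem.Str.split₀ (PySem.Str.strip s) with
         | [_, arg] => (PySem.Int.ofStr? arg).isSome | _ => false) = true := by
        unfold PreLine at hs
        rw [hsw] at hs
        simpa using hs
      rcases hl : PySem.Str.split₀ (PySem.Str.strip s) with _ | ⟨t, _ | ⟨arg, _ | ⟨x, rest⟩⟩⟩ <;>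
        rw [hl] at hps <;> try simp at hps
      cases hv : PySem.Int.ofStr? arg with
      | none => rw [hv] at hps; simp at hps
      | some v =>
        simp only [stepA, stepB, runA, mkA, if_neg hne, if_pos hsw, hl, hv]
        have h2 : ((2 : Nat) : Int) = 2 := by norm_num
        have := step_common reg (reg + v) tl 2 (by norm_num) le_rfl
        rw [h2] at this
        simpa [mkA, List.replicate] using this
    · simp only [stepA, stepB, runA, mkA, if_neg hne, if_neg hsw]
      have hlt : ¬ ((tl.length : Int) ≥ checkOf tl.length) := by
        have := checkOf_gt tl.length
        omega
      rw [if_neg hlt, if_neg hlt, pixelLoop]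
      simp

lemma fold_mkA (data : List String) (h : ∀ s ∈ data, PreLine s = true) (reg : Int) (tl : List Int) :
    data.foldl stepA (mkA reg tl) =
      mkA (data.foldl stepB (reg, tl)).1 (data.foldl stepB (reg, tl)).2 := by
  induction data generalizing reg tl with
  | nil => rfl
  | cons s rest ih =>
    have hs := h s (List.mem_cons_self ..)
    have hrest : ∀ t ∈ rest, PreLine t = true := fun t ht => h t (List.mem_cons_of_mem _ ht)
    simp only [List.foldl_cons, stepA_mkA s hs reg tl]
    exact ih hrest _ _

-- ===== VERDICT (by name: the statement is the Claim_ definition above) =====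
theorem part1_spec : Claim_equal_part1 := by
  intro data _hdom hpre
  have h : ∀ s ∈ data, PreLine s = true := by
    intro s hs
    exact List.all_eq_true.mp hpre s hs
  unfold Spec_part1 part1 part1_alt
  have h0 : (1, 0, 0, 0, ([] : List String), (20 : Int)) = mkA 1 [] := by
    unfold mkA strengthPass pixelPass checkOf Kc; decide
  rw [h0, fold_mkA data h 1 []]
  rfl
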